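-- pv_equiv track=rewrite | github.com/raeez/chiral-bar-cobar | compute/lib/theorem_bcd_w_duality_engine.py | _x_collapse
-- ===== SOURCE A (Python) =====
-- from collections import Counter
-- from typing import Any, Dict, List, Optional, Tuple
--
-- def _x_collapse(partition: Tuple[int, ...], target_type: str) -> Tuple[int, ...]:
--     """X-collapse: largest X-valid partition dominated by the input.
--
--     Algorithm (Collingwood-McGovern, Chapter 6):
--     Scan parts from largest to smallest.  When an even part (for B/D) or
--     odd part (for C) has odd multiplicity, decrease the LAST occurrence
--     of that part by 1.  This preserves dominance ordering.  Repeat until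
--     valid.  The total decreases by 1 at each step.
--
--     For same-type duality (D -> D): the total is preserved up to collapse.
--     For cross-type (B -> C or C -> B): the total changes, which is correct
--     since B_n orbits are partitions of 2n+1 and C_n orbits are partitions of 2n.
--     """
--     result = list(sorted(partition, reverse=True))
--     max_iterations = 2 * sum(result) + 10  # safety bound
--
--     for _ in range(max_iterations):
--         result = [x for x in result if x > 0]
--         if not result:
--             break
--         result.sort(reverse=True)
--         mult = Counter(result)
--
--         violation_found = False
--         if target_type in ('B', 'D'):
--             # Even parts must have even multiplicity
--             for p in sorted(mult.keys(), reverse=True):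
--                 if p > 0 and p % 2 == 0 and mult[p] % 2 == 1:
--                     # Decrease LAST occurrence of p by 1
--                     for i in range(len(result) - 1, -1, -1):
--                         if result[i] == p:
--                             result[i] -= 1
--                             break
--                     violation_found = True
--                     break
--         elif target_type == 'C':
--             # Odd parts must have even multiplicity
--             for p in sorted(mult.keys(), reverse=True):
--                 if p > 0 and p % 2 == 1 and mult[p] % 2 == 1:
--                     for i in range(len(result) - 1, -1, -1):
--                         if result[i] == p:
--                             result[i] -= 1
--                             break
--                     violation_found = True
--                     break
--
--         if not violation_found:
--             break
--
--     result = [x for x in result if x > 0]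
--     result.sort(reverse=True)
--     return tuple(result) if result else (0,)
-- ===== SOURCE B (Python) =====
-- from collections import Counter
--
-- def _x_collapse(partition, target_type):
--     """Single pass: an X-violation fix (decrementing the last copy of an
--     even part with odd multiplicity for B/D, odd part for C) never creates
--     a new violation, so each distinct part needs at most one fix."""
--     counts = Counter(x for x in partition if x > 0)
--     if target_type in ('B', 'D'):
--         parity = 0
--     elif target_type == 'C':
--         parity = 1
--     else:
--         parity = None
--     out = []
--     for p, c in counts.items():
--         if parity is not None and p % 2 == parity and c % 2 == 1:
--             out.extend([p] * (c - 1))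
--             if p > 1:
--                 out.append(p - 1)
--         else:
--             out.extend([p] * c)
--     out.sort(reverse=True)
--     return tuple(out) if out else (0,)
-- ===== Notes on version B (the rewrite author's own statement) =====
-- stated objective: alternative
-- what changed: B replaces A's repeat-until-no-violation loop (each round re-filters, re-sorts and re-counts the whole list to fix ONE part) by a single pass over the Counter of positive parts that fixes every odd-multiplicity part of the relevant parity at once (a fix never creates a new violation), followed by one sort.
-- intended difference: On inputs whose (non-partition) negative entries drag A's safety bound 2*sum+10 below the number of odd-multiplicity parts of the relevant parity, A's loop is cut short and A returns a partition with unfixed odd multiplicities (e.g. ((2,-11),'B') -> (2,)); B ignores the junk negative parts and returns the fully collapsed partition ((1,)), which is the intended value. — e.g. on _x_collapse([2, -11], "B"): A returns [2], B returns [1]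
import Mathlib
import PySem

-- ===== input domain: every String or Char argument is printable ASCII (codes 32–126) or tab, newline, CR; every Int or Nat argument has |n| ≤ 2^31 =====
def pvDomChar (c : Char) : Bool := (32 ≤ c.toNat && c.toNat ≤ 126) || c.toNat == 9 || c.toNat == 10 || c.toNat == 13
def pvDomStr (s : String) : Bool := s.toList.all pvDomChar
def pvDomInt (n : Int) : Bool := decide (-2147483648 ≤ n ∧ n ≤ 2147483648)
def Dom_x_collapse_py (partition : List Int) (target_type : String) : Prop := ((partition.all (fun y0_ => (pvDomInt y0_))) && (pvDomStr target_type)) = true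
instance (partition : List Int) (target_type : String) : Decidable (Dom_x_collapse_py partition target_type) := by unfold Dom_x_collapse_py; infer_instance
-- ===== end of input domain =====

-- B replaces A's fix-one-violation-per-round loop (re-filter, re-sort, re-count each round)
-- by a single pass over the Counter of positive parts (a fix never creates a new violation),
-- then one sort.

-- ===== PORT A =====

-- inner 'for i in range(len(result)-1,-1,-1): if result[i]==p: result[i]-=1; break'
-- (decrement the LAST occurrence of p; no-op when p is absent, exactly like the Python loop)
def pvDecLast : List Int → Int → List Int
  | [], _ => []
  | x :: xs, p =>
    if p ∈ xs then x :: pvDecLast xs p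
    else if x = p then (x - 1) :: xs
    else x :: xs

-- 'for _ in range(max_iterations): …' with its two breaks (empty result / no violation found)
def pvALoop (target_type : String) : Nat → List Int → List Int
  | 0, result => result
  | fuel + 1, result =>
    let result := result.filter (fun x => decide (0 < x))
    if result = [] then result
    else
      let result := PySem.List.sorted result (fun x => x) true
      let mult := PySem.Dict.counter result
      if target_type = "B" ∨ target_type = "D" then
        match (PySem.List.sorted mult.keys (fun p => p) true).find?
            (fun p => decide (0 < p) && decide (PySem.Int.mod p 2 = 0) &&
                      decide (PySem.Int.mod (mult.getD p 0) 2 = 1)) with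
        | some p => pvALoop target_type fuel (pvDecLast result p)
        | none => result
      else if target_type = "C" then
        match (PySem.List.sorted mult.keys (fun p => p) true).find?
            (fun p => decide (0 < p) && decide (PySem.Int.mod p 2 = 1) &&
                      decide (PySem.Int.mod (mult.getD p 0) 2 = 1)) with
        | some p => pvALoop target_type fuel (pvDecLast result p)
        | none => result
      else result

def x_collapse_py (partition : List Int) (target_type : String) : List Int :=
  let result := PySem.List.sorted partition (fun x => x) true
  let maxIterations := 2 * result.sum + 10
  let result := pvALoop target_type maxIterations.toNat result
  let result := result.filter (fun x => decide (0 < x))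
  let result := PySem.List.sorted result (fun x => x) true
  if result = [] then [0] else result

-- ===== PORT B =====

-- 'for p, c in counts.items(): …' building 'out'
def pvBOut (partition : List Int) (target_type : String) : List Int :=
  let counts := PySem.Dict.counter (partition.filter (fun x => decide (0 < x)))
  let parity : Option Int :=
    if target_type = "B" ∨ target_type = "D" then some 0
    else if target_type = "C" then some 1
    else none
  counts.items.foldl (fun acc pc =>
      match parity with
      | some r =>
        if PySem.Int.mod pc.1 2 = r ∧ PySem.Int.mod pc.2 2 = 1 then
          acc ++ List.replicate (pc.2 - 1).toNat pc.1 ++ (if 1 < pc.1 then [pc.1 - 1] else [])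
        else acc ++ List.replicate pc.2.toNat pc.1
      | none => acc ++ List.replicate pc.2.toNat pc.1) []

def x_collapse_py_alt (partition : List Int) (target_type : String) : List Int :=
  let out := pvBOut partition target_type
  let out := PySem.List.sorted out (fun x => x) true
  if out = [] then [0] else out

-- ===== PRECONDITION & SPEC =====

-- On inputs whose (non-partition) negative entries drag A's safety bound 2*sum+10 below the
-- number of odd-multiplicity parts of the relevant parity, A's loop is cut short and A returns
-- a partition with unfixed odd multiplicities; B ignores the junk negative parts and returns
-- the fully collapsed partition, the intended value.
def D_x_collapse_py (partition : List Int) (target_type : String) : Prop :=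
  target_type ∈ ["B", "C", "D"] ∧
  max (2 * partition.sum + 10) 0 <
    (partition.dedup.countP (fun p => decide (0 < p ∧
      p % 2 = (if target_type = "C" then 1 else 0) ∧ partition.count p % 2 = 1)) : Int)
instance (partition : List Int) (target_type : String) : Decidable (D_x_collapse_py partition target_type) := by unfold D_x_collapse_py; infer_instance

def Spec_x_collapse_py (partition : List Int) (target_type : String) (out : List Int) : Prop := ¬ D_x_collapse_py partition target_type → out = x_collapse_py_alt partition target_type
instance (partition : List Int) (target_type : String) (out : List Int) : Decidable (Spec_x_collapse_py partition target_type out) := by unfold Spec_x_collapse_py; infer_instance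

def pvDiffWitness_x_collapse_py : List Int × String := ([2, -11], "B")
def pvDiffWitnessOut_x_collapse_py : (List Int) × (List Int) := ([2], [1])

-- ===== CLAIM (what is proved, stated in full; the proofs are below) =====
def Claim_unchanged_x_collapse_py : Prop := ∀ (partition : List Int) (target_type : String), Dom_x_collapse_py partition target_type → Spec_x_collapse_py partition target_type (x_collapse_py partition target_type)
def Claim_exact_x_collapse_py : Prop := ∀ (partition : List Int) (target_type : String), Dom_x_collapse_py partition target_type → D_x_collapse_py partition target_type → x_collapse_py partition target_type ≠ x_collapse_py_alt partition target_type
def Claim_changed_x_collapse_py : Prop := Dom_x_collapse_py (pvDiffWitness_x_collapse_py.1) (pvDiffWitness_x_collapse_py.2) ∧ D_x_collapse_py (pvDiffWitness_x_collapse_py.1) (pvDiffWitness_x_collapse_py.2) ∧ x_collapse_py (pvDiffWitness_x_collapse_py.1) (pvDiffWitness_x_collapse_py.2) = pvDiffWitnessOut_x_collapse_py.1 ∧ x_collapse_py_alt (pvDiffWitness_x_collapse_py.1) (pvDiffWitness_x_collapse_py.2) = pvDiffWitnessOut_x_collapse_py.2 ∧ pvDiffWitnessOut_x_collapse_py.1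 ≠ pvDiffWitnessOut_x_collapse_py.2

-- ===== LEMMAS AND PROOFS =====

-- the distinct positive parts of parity r occurring an odd number of times (A fixes each once)
def pvOddParts (r : Int) (L : List Int) : Finset Int :=
  L.toFinset.filter (fun p => 0 < p ∧ p % 2 = r ∧ ¬ (2 ∣ L.count p))

theorem card_pvOddParts (r : Int) (L : List Int) :
    (pvOddParts r L).card
      = L.dedup.countP (fun p => decide (0 < p ∧ p % 2 = r ∧ L.count p % 2 = 1)) := by
  unfold pvOddParts
  have h1 : L.toFinset.filter (fun p => 0 < p ∧ p % 2 = r ∧ ¬ (2 ∣ L.count p))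
      = L.toFinset.filter (fun p => 0 < p ∧ p % 2 = r ∧ L.count p % 2 = 1) := by
    apply Finset.filter_congr
    intro x _
    constructor
    · rintro ⟨a, b, c⟩; exact ⟨a, b, by omega⟩
    · rintro ⟨a, b, c⟩; exact ⟨a, b, by omega⟩
  rw [h1, List.countP_eq_length_filter]
  exact Eq.symm (Nat.add_zero _)

-- the multiplicity of each q > 0 after the collapse, in terms of the input counts:
-- q loses one copy if it is itself a violation, and gains one copy if q+1 is
def pvF (r : Int) (L : List Int) (q : Int) : Nat :=
  (if q % 2 = r ∧ ¬ (2 ∣ L.count q) then L.count q - 1 else L.count q)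
  + (if (q + 1) % 2 = r ∧ ¬ (2 ∣ L.count (q + 1)) then 1 else 0)

theorem count_pvDecLast (xs : List Int) (p q : Int) (hp : p ∈ xs) :
    (pvDecLast xs p).count q =
      if q = p then xs.count p - 1
      else if q = p - 1 then xs.count (p - 1) + 1
      else xs.count q := by
  induction xs with
  | nil => simp at hp
  | cons x xs ih =>
    by_cases hmem : p ∈ xs
    · have hcp : 0 < xs.count p := List.count_pos_iff.mpr hmem
      simp only [pvDecLast, if_pos hmem, List.count_cons, ih hmem]
      split_ifs <;> simp_all
    · have hx : x = p := by rcases List.mem_cons.mp hp with h | h; omega; exact absurd h hmem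
      subst hx
      have hc : xs.count x = 0 := List.count_eq_zero.mpr hmem
      simp only [pvDecLast, if_neg hmem]
      rw [if_true]
      clear ih hp
      simp only [List.count_cons]
      split_ifs
      all_goals simp only [beq_iff_eq] at *
      all_goals (try subst_vars)
      all_goals omega

theorem count_filter_pos (L : List Int) (q : Int) :
    (L.filter (fun x => decide (0 < x))).count q = if 0 < q then L.count q else 0 := by
  by_cases h : 0 < q
  · simp [List.count_filter, h]
  · rw [if_neg h, List.count_eq_zero]
    intro hmem
    exact h (by simpa using (List.mem_filter.mp hmem).2)

theorem pvOddParts_congr (r : Int) (L M : List Int) (h : ∀ s, 0 < s → L.count s = M.count s) :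
    pvOddParts r L = pvOddParts r M := by
  unfold pvOddParts
  apply Finset.ext
  intro q
  rw [Finset.mem_filter, Finset.mem_filter, List.mem_toFinset, List.mem_toFinset,
      ← List.count_pos_iff, ← List.count_pos_iff]
  constructor
  · rintro ⟨hc, h0, hr, hd⟩
    rw [h q h0] at hc hd
    exact ⟨hc, h0, hr, hd⟩
  · rintro ⟨hc, h0, hr, hd⟩
    rw [← h q h0] at hc hd
    exact ⟨hc, h0, hr, hd⟩

theorem pvF_congr (r : Int) (L M : List Int) (h : ∀ s, 0 < s → L.count s = M.count s)
    (q : Int) (hq : 0 < q) : pvF r L q = pvF r M q := by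
  unfold pvF
  rw [h q hq, h (q + 1) (by omega)]

theorem pvF_eq_count (r : Int) (L : List Int) (h : pvOddParts r L = ∅) (q : Int) (hq : 0 < q) :
    pvF r L q = L.count q := by
  have key : ∀ p : Int, 0 < p → p % 2 = r → ¬ ¬ (2 ∣ L.count p) := by
    intro p h0 hr hc
    have hm : p ∈ L := by
      have : L.count p ≠ 0 := by rintro h0'; exact hc (h0' ▸ ⟨0, rfl⟩)
      exact List.count_pos_iff.mp (Nat.pos_of_ne_zero this)
    have : p ∈ pvOddParts r L := by
      unfold pvOddParts
      rw [Finset.mem_filter, List.mem_toFinset]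
      exact ⟨hm, h0, hr, hc⟩
    simp [h] at this
  unfold pvF
  rw [if_neg, if_neg]
  · omega
  · rintro ⟨h1, h2⟩; exact key (q+1) (by omega) h1 h2
  · rintro ⟨h1, h2⟩; exact key q hq h1 h2

theorem pvF_pvDecLast (r : Int) (L : List Int) (p : Int) (hp : p ∈ L) (hp0 : 0 < p)
    (hpar : p % 2 = r) (hodd : ¬ (2 ∣ L.count p)) (q : Int) (hq : 0 < q) :
    pvF r (pvDecLast L p) q = pvF r L q := by
  have hcp : 0 < L.count p := List.count_pos_iff.mpr hp
  unfold pvF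
  rw [count_pvDecLast L p q hp, count_pvDecLast L p (q+1) hp]
  split_ifs <;> (try subst_vars)
  all_goals try simp only [Int.add_sub_cancel, true_and, not_true, not_not] at *
  all_goals omega

theorem pvOddParts_pvDecLast (r : Int) (L : List Int) (p : Int) (hp : p ∈ L) (hp0 : 0 < p)
    (hpar : p % 2 = r) (hodd : ¬ (2 ∣ L.count p)) :
    pvOddParts r (pvDecLast L p) = (pvOddParts r L).erase p := by
  have hcp : 0 < L.count p := List.count_pos_iff.mpr hp
  apply Finset.ext
  intro q
  rw [Finset.mem_erase]
  unfold pvOddParts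
  rw [Finset.mem_filter, Finset.mem_filter, List.mem_toFinset, List.mem_toFinset,
      ← List.count_pos_iff, ← List.count_pos_iff, count_pvDecLast L p q hp]
  split_ifs <;> constructor <;> (intro h; try exact ⟨by omega, by omega, by omega, by omega⟩)

theorem pvOddParts_filter_pos (r : Int) (L : List Int) :
    pvOddParts r (L.filter (fun x => decide (0 < x))) = pvOddParts r L := by
  unfold pvOddParts
  apply Finset.ext
  intro q
  rw [Finset.mem_filter, Finset.mem_filter, List.mem_toFinset, List.mem_toFinset,
      ← List.count_pos_iff, ← List.count_pos_iff, count_filter_pos]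
  constructor
  · rintro ⟨hc, h0, hr, hd⟩
    rw [if_pos h0] at hc hd
    exact ⟨hc, h0, hr, hd⟩
  · rintro ⟨hc, h0, hr, hd⟩
    rw [if_pos h0]
    exact ⟨hc, h0, hr, hd⟩

theorem sorted_rev_congr_perm (xs ys : List Int) (h : xs.Perm ys) :
    PySem.List.sorted xs (fun x => x) true = PySem.List.sorted ys (fun x => x) true := by
  apply PySem.List.eq_of_perm_of_pairwise_le_of_injective (key := fun x : Int => -x)
  · intro a b hab; simpa using hab
  · exact ((PySem.List.sorted_perm xs _ true).trans h).trans (PySem.List.sorted_perm ys _ true).symm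
  · exact (PySem.List.sorted_pairwise_rev xs (fun x => x) ).imp (by intro a b hba; simpa using hba)
  · exact (PySem.List.sorted_pairwise_rev ys (fun x => x) ).imp (by intro a b hba; simpa using hba)

theorem pvPred_iff (L2 : List Int) (r p : Int) :
    ((decide (0 < p) && decide (PySem.Int.mod p 2 = r) &&
      decide (PySem.Int.mod ((PySem.Dict.counter L2).getD p 0) 2 = 1)) = true)
      ↔ (0 < p ∧ p % 2 = r ∧ ¬ (2 ∣ L2.count p)) := by
  rw [PySem.Dict.getD_counter]
  have h2 : (0:Int) < 2 := by norm_num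
  simp only [Bool.and_eq_true, decide_eq_true_eq, PySem.Int.mod_eq_emod_of_pos h2]
  constructor
  · rintro ⟨⟨h0, hr⟩, hm⟩
    refine ⟨h0, hr, ?_⟩
    omega
  · rintro ⟨h0, hr, hm⟩
    refine ⟨⟨h0, hr⟩, ?_⟩
    omega

theorem mem_sorted_keys_counter (L2 : List Int) (p : Int) :
    p ∈ PySem.List.sorted (PySem.Dict.counter L2).keys (fun p => p) true ↔ p ∈ L2 := by
  rw [PySem.List.mem_sorted, PySem.Dict.keys_counter, PySem.Set.mem_ofList]

theorem pvALoop_count (t : String) (r : Int)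
    (ht : (t = "B" ∨ t = "D") ∧ r = 0 ∨ t = "C" ∧ r = 1) :
    ∀ (fuel : Nat) (L : List Int), (pvOddParts r L).card ≤ fuel →
      ∀ q, 0 < q → (pvALoop t fuel L).count q = pvF r L q := by
  intro fuel
  induction fuel with
  | zero =>
    intro L hcard q hq
    have hempty : pvOddParts r L = ∅ := Finset.card_eq_zero.mp (Nat.le_zero.mp hcard)
    show L.count q = pvF r L q
    exact (pvF_eq_count r L hempty q hq).symm
  | succ fuel ih =>
    intro L hcard q hq
    have hc1 : ∀ s, 0 < s →
        (L.filter (fun x => decide (0 < x))).count s = L.count s := by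
      intro s hs; rw [count_filter_pos, if_pos hs]
    by_cases hnil : L.filter (fun x => decide (0 < x)) = []
    · have hstep : pvALoop t (fuel+1) L = L.filter (fun x => decide (0 < x)) := by
        simp only [pvALoop]
        rw [if_pos hnil]
      rw [hstep, hnil]
      have hL0 : ∀ s, 0 < s → L.count s = 0 := by
        intro s hs; rw [← hc1 s hs, hnil, List.count_nil]
      have hempty : pvOddParts r L = ∅ := by
        rw [← pvOddParts_filter_pos r L, hnil]
        simp [pvOddParts]
      rw [pvF_eq_count r L hempty q hq, hL0 q hq, List.count_nil]
    · -- nonempty: the sorted list L2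
      set L1 := L.filter (fun x => decide (0 < x)) with hL1def
      set L2 := PySem.List.sorted L1 (fun x => x) true with hL2def
      have hc2 : ∀ s, L2.count s = L1.count s :=
        fun s => (PySem.List.sorted_perm L1 (fun x => x) true).count_eq s
      have hc2L : ∀ s, 0 < s → L2.count s = L.count s := by
        intro s hs; rw [hc2 s, hc1 s hs]
      have hO2 : pvOddParts r L2 = pvOddParts r L := by
        rw [pvOddParts_congr r L2 L1 (fun s hs => hc2 s), pvOddParts_filter_pos]
      have hF2 : ∀ s, 0 < s → pvF r L2 s = pvF r L s :=
        fun s hs => pvF_congr r L2 L hc2L s hs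
      rcases ht with ⟨htBD, hr0⟩ | ⟨htC, hr1⟩
      · -- target B or D, r = 0
        subst hr0
        rcases hfind : (PySem.List.sorted (PySem.Dict.counter L2).keys (fun p => p) true).find?
            (fun p => decide (0 < p) && decide (PySem.Int.mod p 2 = 0) &&
                      decide (PySem.Int.mod ((PySem.Dict.counter L2).getD p 0) 2 = 1)) with _ | p
        · -- no violation: loop returns L2
          have hstep : pvALoop t (fuel+1) L = L2 := by
            simp only [pvALoop]
            rw [if_neg hnil, if_pos htBD, ← hL1def, ← hL2def, hfind]
          rw [hstep, hc2L q hq]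
          have hempty : pvOddParts 0 L = ∅ := by
            rw [← hO2]
            apply Finset.eq_empty_of_forall_notMem
            intro p hmem
            rw [pvOddParts, Finset.mem_filter, List.mem_toFinset] at hmem
            obtain ⟨hmL2, h0, hrp, hd⟩ := hmem
            have := List.find?_eq_none.mp hfind p ((mem_sorted_keys_counter L2 p).mpr hmL2)
            exact this ((pvPred_iff L2 0 p).mpr ⟨h0, hrp, hd⟩)
          exact (pvF_eq_count 0 L hempty q hq).symm
        · -- violation at p
          have hpred := List.find?_some hfind
          have hmemks := List.mem_of_find?_eq_some hfind
          rw [pvPred_iff] at hpred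
          obtain ⟨hp0, hpr, hpd⟩ := hpred
          have hpL2 : p ∈ L2 := (mem_sorted_keys_counter L2 p).mp hmemks
          have hstep : pvALoop t (fuel+1) L = pvALoop t fuel (pvDecLast L2 p) := by
            simp only [pvALoop]
            rw [if_neg hnil, if_pos htBD, ← hL1def, ← hL2def, hfind]
          have hOerase := pvOddParts_pvDecLast 0 L2 p hpL2 hp0 hpr hpd
          have hpmem : p ∈ pvOddParts 0 L2 := by
            rw [pvOddParts, Finset.mem_filter, List.mem_toFinset]
            exact ⟨hpL2, hp0, hpr, hpd⟩
          have hcard' : (pvOddParts 0 (pvDecLast L2 p)).card ≤ fuel := by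
            rw [hOerase, Finset.card_erase_of_mem hpmem, hO2]
            rw [hO2] at hpmem
            have : 0 < (pvOddParts 0 L).card := Finset.card_pos.mpr ⟨p, hpmem⟩
            omega
          rw [hstep, ih (pvDecLast L2 p) hcard' q hq,
              pvF_pvDecLast 0 L2 p hpL2 hp0 hpr hpd q hq, hF2 q hq]
      · -- target C, r = 1
        subst hr1
        rcases hfind : (PySem.List.sorted (PySem.Dict.counter L2).keys (fun p => p) true).find?
            (fun p => decide (0 < p) && decide (PySem.Int.mod p 2 = 1) &&
                      decide (PySem.Int.mod ((PySem.Dict.counter L2).getD p 0) 2 = 1)) with _ | p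
        · have hntBD : ¬ (t = "B" ∨ t = "D") := by subst htC; decide
          have hstep : pvALoop t (fuel+1) L = L2 := by
            simp only [pvALoop]
            rw [if_neg hnil, if_neg hntBD, if_pos htC, ← hL1def, ← hL2def, hfind]
          rw [hstep, hc2L q hq]
          have hempty : pvOddParts 1 L = ∅ := by
            rw [← hO2]
            apply Finset.eq_empty_of_forall_notMem
            intro p hmem
            rw [pvOddParts, Finset.mem_filter, List.mem_toFinset] at hmem
            obtain ⟨hmL2, h0, hrp, hd⟩ := hmem
            have := List.find?_eq_none.mp hfind p ((mem_sorted_keys_counter L2 p).mpr hmL2)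
            exact this ((pvPred_iff L2 1 p).mpr ⟨h0, hrp, hd⟩)
          exact (pvF_eq_count 1 L hempty q hq).symm
        · have hntBD : ¬ (t = "B" ∨ t = "D") := by subst htC; decide
          have hpred := List.find?_some hfind
          have hmemks := List.mem_of_find?_eq_some hfind
          rw [pvPred_iff] at hpred
          obtain ⟨hp0, hpr, hpd⟩ := hpred
          have hpL2 : p ∈ L2 := (mem_sorted_keys_counter L2 p).mp hmemks
          have hstep : pvALoop t (fuel+1) L = pvALoop t fuel (pvDecLast L2 p) := by
            simp only [pvALoop]
            rw [if_neg hnil, if_neg hntBD, if_pos htC, ← hL1def, ← hL2def, hfind]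
          have hOerase := pvOddParts_pvDecLast 1 L2 p hpL2 hp0 hpr hpd
          have hpmem : p ∈ pvOddParts 1 L2 := by
            rw [pvOddParts, Finset.mem_filter, List.mem_toFinset]
            exact ⟨hpL2, hp0, hpr, hpd⟩
          have hcard' : (pvOddParts 1 (pvDecLast L2 p)).card ≤ fuel := by
            rw [hOerase, Finset.card_erase_of_mem hpmem, hO2]
            rw [hO2] at hpmem
            have : 0 < (pvOddParts 1 L).card := Finset.card_pos.mpr ⟨p, hpmem⟩
            omega
          rw [hstep, ih (pvDecLast L2 p) hcard' q hq,
              pvF_pvDecLast 1 L2 p hpL2 hp0 hpr hpd q hq, hF2 q hq]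

theorem pvALoop_count_other (t : String) (h1 : ¬ (t = "B" ∨ t = "D")) (h2 : ¬ t = "C") :
    ∀ (fuel : Nat) (L : List Int) (q : Int), 0 < q →
      (pvALoop t fuel L).count q = L.count q := by
  intro fuel
  cases fuel with
  | zero => intro L q hq; rfl
  | succ fuel =>
    intro L q hq
    by_cases hnil : L.filter (fun x => decide (0 < x)) = []
    · have hstep : pvALoop t (fuel+1) L = L.filter (fun x => decide (0 < x)) := by
        simp only [pvALoop]; rw [if_pos hnil]
      rw [hstep, count_filter_pos, if_pos hq]
    · have hstep : pvALoop t (fuel+1) L =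
          PySem.List.sorted (L.filter (fun x => decide (0 < x))) (fun x => x) true := by
        simp only [pvALoop]
        rw [if_neg hnil, if_neg h1, if_neg h2]
      rw [hstep, (PySem.List.sorted_perm _ (fun x => x) true).count_eq q,
          count_filter_pos, if_pos hq]

theorem count_foldl_append {α : Type} (I : List α) (gg : α → List Int) (acc : List Int) (q : Int) :
    (I.foldl (fun a x => a ++ gg x) acc).count q
      = acc.count q + (I.map (fun x => (gg x).count q)).sum := by
  induction I generalizing acc with
  | nil => simp
  | cons x I ih =>
    rw [List.foldl_cons, ih, List.count_append, List.map_cons, List.sum_cons]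
    omega

theorem sum_two_support (K : List Int) (h : Int → Nat) (a b : Int) (hab : a ≠ b)
    (hz : ∀ k ∈ K, k ≠ a → k ≠ b → h k = 0) (hnd : K.Nodup) :
    (K.map h).sum = (if a ∈ K then h a else 0) + (if b ∈ K then h b else 0) := by
  induction K with
  | nil => simp
  | cons x K ih =>
    obtain ⟨hx, hnd'⟩ := List.nodup_cons.mp hnd
    have ihz : ∀ k ∈ K, k ≠ a → k ≠ b → h k = 0 := fun k hk => hz k (List.mem_cons_of_mem x hk)
    rw [List.map_cons, List.sum_cons, ih ihz hnd']
    by_cases hxa : x = a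
    · subst hxa
      have hbx : ¬ (b = x) := fun e => hab e.symm
      simp [hx, hbx, List.mem_cons]
    · by_cases hxb : x = b
      · subst hxb
        have hax : ¬ (a = x) := fun e => hxa e.symm
        simp [hx, hax, List.mem_cons]
        omega
      · have h0 : h x = 0 := hz x List.mem_cons_self hxa hxb
        have hax : ¬ (a = x) := fun e => hxa e.symm
        have hbx : ¬ (b = x) := fun e => hxb e.symm
        simp [h0, hax, hbx, List.mem_cons]

theorem pvModNat_iff (c : Nat) : PySem.Int.mod (c : Int) 2 = 1 ↔ ¬ (2 ∣ c) := by
  rw [PySem.Int.mod_eq_emod_of_pos (by norm_num)]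
  omega

theorem pvModPar_iff (k r : Int) : PySem.Int.mod k 2 = r ↔ k % 2 = r := by
  rw [PySem.Int.mod_eq_emod_of_pos (by norm_num)]

-- count of q in one item's contribution, parity branch

theorem count_gg (r q k : Int) (c : Nat) (hk : 0 < k) :
    ((if PySem.Int.mod k 2 = r ∧ PySem.Int.mod ((c : Int)) 2 = 1 then
        List.replicate ((c : Int) - 1).toNat k ++ (if 1 < k then [k - 1] else [])
      else List.replicate (c : Int).toNat k) : List Int).count q
    = (if k = q then (if k % 2 = r ∧ ¬ (2 ∣ c) then c - 1 else c) else 0)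
      + (if k = q + 1 ∧ k % 2 = r ∧ ¬ (2 ∣ c) ∧ 0 < q then 1 else 0) := by
  have hct : ((c : Int) - 1).toNat = c - 1 := by omega
  by_cases hc : PySem.Int.mod k 2 = r ∧ PySem.Int.mod ((c : Int)) 2 = 1
  · have hkr : k % 2 = r := (pvModPar_iff k r).mp hc.1
    have hdv : ¬ (2 ∣ c) := (pvModNat_iff c).mp hc.2
    rw [if_pos hc]
    simp only [List.count_append, List.count_replicate, List.count_nil, List.count_singleton,
      beq_iff_eq, hct, apply_ite (List.count q)]
    split_ifs <;> omega
  · have hnc : ¬ (k % 2 = r ∧ ¬ (2 ∣ c)) := by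
      rintro ⟨h1, h2⟩
      exact hc ⟨(pvModPar_iff k r).mpr h1, (pvModNat_iff c).mpr h2⟩
    rw [if_neg hc]
    simp only [List.count_replicate, beq_iff_eq, Int.toNat_natCast]
    split_ifs <;> omega

-- count of q in one item's contribution, no-parity branch

theorem count_gg_none (q k : Int) (c : Nat) (_hk : 0 < k) :
    (List.replicate ((c : Int)).toNat k : List Int).count q
    = if k = q then c else 0 := by
  rw [List.count_replicate]
  split_ifs <;> simp_all

theorem count_fold_parity (P : List Int) (r q : Int) (hPpos : ∀ x ∈ P, (0:Int) < x) :
    (((PySem.Dict.counter P).items).foldl (fun acc pc =>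
        if PySem.Int.mod pc.1 2 = r ∧ PySem.Int.mod pc.2 2 = 1 then
          acc ++ List.replicate (pc.2 - 1).toNat pc.1 ++ (if 1 < pc.1 then [pc.1 - 1] else [])
        else acc ++ List.replicate pc.2.toNat pc.1) []).count q
    = if 0 < q then pvF r P q else 0 := by
  rw [PySem.Dict.items_counter P, List.foldl_map]
  set K := PySem.Set.ofList P with hKdef
  have hKnd : K.Nodup := PySem.Set.nodup_ofList P
  have hKmem : ∀ k : Int, k ∈ K ↔ k ∈ P := fun k => PySem.Set.mem_ofList P k
  have hKpos : ∀ k ∈ K, (0:Int) < k := fun k hk => hPpos k ((hKmem k).mp hk)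
  set gg : Int → List Int := fun k =>
      if PySem.Int.mod k 2 = r ∧ PySem.Int.mod ((P.count k : Int)) 2 = 1 then
        List.replicate ((P.count k : Int) - 1).toNat k ++ (if 1 < k then [k - 1] else [])
      else List.replicate ((P.count k : Int)).toNat k with hgg
  have hfold : K.foldl (fun acc k =>
      if PySem.Int.mod k 2 = r ∧ PySem.Int.mod ((P.count k : Int)) 2 = 1 then
        acc ++ List.replicate ((P.count k : Int) - 1).toNat k ++ (if 1 < k then [k - 1] else [])
      else acc ++ List.replicate ((P.count k : Int)).toNat k) []
      = K.foldl (fun acc k => acc ++ gg k) [] := by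
    apply PySem.List.foldl_congr_mem
    intro acc k _
    simp only [hgg]
    split_ifs <;> first | rw [List.append_assoc] | rfl
  rw [hfold, count_foldl_append K gg [] q, List.count_nil]
  have hcgg : ∀ k ∈ K, (gg k).count q
      = (if k = q then (if k % 2 = r ∧ ¬ (2 ∣ P.count k) then P.count k - 1 else P.count k) else 0)
        + (if k = q + 1 ∧ k % 2 = r ∧ ¬ (2 ∣ P.count k) ∧ 0 < q then 1 else 0) := by
    intro k hk
    simp only [hgg]
    exact count_gg r q k (P.count k) (hKpos k hk)
  have hz : ∀ k ∈ K, k ≠ q → k ≠ q + 1 → (fun k => (gg k).count q) k = 0 := by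
    intro k hk h1 h2
    show (gg k).count q = 0
    rw [hcgg k hk, if_neg h1, if_neg (by tauto)]
  rw [sum_two_support K (fun k => (gg k).count q) q (q+1) (by omega) hz hKnd]
  have hmemc : ∀ s : Int, s ∈ K ↔ 0 < P.count s := by
    intro s; rw [hKmem s, ← List.count_pos_iff]
  by_cases hqK : q ∈ K
  · have hq0 : 0 < q := hKpos q hqK
    rw [if_pos hq0, hcgg q hqK]
    by_cases hq1K : q + 1 ∈ K
    · rw [hcgg (q+1) hq1K]
      unfold pvF
      have h1 : 0 < P.count q := (hmemc q).mp hqK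
      split_ifs <;> omega
    · have hc1 : P.count (q+1) = 0 := by
        by_contra hne
        exact hq1K ((hmemc (q+1)).mpr (by omega))
      unfold pvF
      have h1 : 0 < P.count q := (hmemc q).mp hqK
      rw [hc1]
      split_ifs <;> omega
  · have hcq : P.count q = 0 := by
      by_contra hne
      exact hqK ((hmemc q).mpr (by omega))
    rw [if_neg hqK]
    by_cases hq1K : q + 1 ∈ K
    · rw [if_pos hq1K, hcgg (q+1) hq1K]
      by_cases hq0 : 0 < q
      · rw [if_pos hq0]
        unfold pvF
        rw [hcq]
        split_ifs <;> omega
      · rw [if_neg hq0, if_neg (by omega : ¬ (q + 1 = q)),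
            if_neg (show ¬ (q + 1 = q + 1 ∧ (q + 1) % 2 = r ∧ ¬ (2 ∣ P.count (q+1)) ∧ 0 < q) from
              fun hcon => hq0 hcon.2.2.2)]
    · by_cases hq0 : 0 < q
      · have hc1 : P.count (q+1) = 0 := by
          by_contra hne
          exact hq1K ((hmemc (q+1)).mpr (by omega))
        rw [if_pos hq0, if_neg hq1K]
        unfold pvF
        rw [hcq, hc1]
        split_ifs <;> omega
      · rw [if_neg hq0, if_neg hq1K]

theorem count_fold_none (P : List Int) (q : Int) (hPpos : ∀ x ∈ P, (0:Int) < x) :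
    (((PySem.Dict.counter P).items).foldl (fun acc pc =>
        acc ++ List.replicate pc.2.toNat pc.1) []).count q
    = if 0 < q then P.count q else 0 := by
  rw [PySem.Dict.items_counter P, List.foldl_map]
  set K := PySem.Set.ofList P with hKdef
  have hKnd : K.Nodup := PySem.Set.nodup_ofList P
  have hKmem : ∀ k : Int, k ∈ K ↔ k ∈ P := fun k => PySem.Set.mem_ofList P k
  have hKpos : ∀ k ∈ K, (0:Int) < k := fun k hk => hPpos k ((hKmem k).mp hk)
  set gg : Int → List Int := fun k => List.replicate ((P.count k : Int)).toNat k with hgg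
  rw [count_foldl_append K gg [] q, List.count_nil]
  have hcgg : ∀ k ∈ K, (gg k).count q = if k = q then P.count k else 0 := by
    intro k hk
    simp only [hgg]
    exact count_gg_none q k (P.count k) (hKpos k hk)
  have hz : ∀ k ∈ K, k ≠ q → k ≠ q + 1 → (fun k => (gg k).count q) k = 0 := by
    intro k hk h1 _
    show (gg k).count q = 0
    rw [hcgg k hk, if_neg h1]
  rw [sum_two_support K (fun k => (gg k).count q) q (q+1) (by omega) hz hKnd]
  have hmemc : ∀ s : Int, s ∈ K ↔ 0 < P.count s := by
    intro s; rw [hKmem s, ← List.count_pos_iff]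
  have hsnd : (if q + 1 ∈ K then (gg (q+1)).count q else 0) = 0 := by
    by_cases h : q + 1 ∈ K
    · rw [if_pos h, hcgg (q+1) h, if_neg (by omega : ¬ (q + 1 = q))]
    · rw [if_neg h]
  rw [hsnd]
  by_cases hqK : q ∈ K
  · have hq0 : 0 < q := hKpos q hqK
    rw [if_pos hqK, if_pos hq0, hcgg q hqK, if_pos rfl]
    omega
  · have hcq : P.count q = 0 := by
      by_contra hne
      exact hqK ((hmemc q).mpr (by omega))
    rw [if_neg hqK]
    split_ifs <;> omega

theorem pvBOut_count (partition : List Int) (t : String) (q : Int) :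
    (pvBOut partition t).count q =
      if 0 < q then
        (if t = "B" ∨ t = "D" then pvF 0 partition q
         else if t = "C" then pvF 1 partition q
         else partition.count q)
      else 0 := by
  have hPpos : ∀ x ∈ partition.filter (fun x => decide (0 < x)), (0:Int) < x := by
    intro x hx
    have := List.mem_filter.mp hx
    simpa using this.2
  have hPc : ∀ s : Int, 0 < s →
      (partition.filter (fun x => decide (0 < x))).count s = partition.count s := by
    intro s hs; rw [count_filter_pos, if_pos hs]
  have hFP : ∀ r, 0 < q → pvF r (partition.filter (fun x => decide (0 < x))) q = pvF r partition q :=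
    fun r hq => pvF_congr r _ partition hPc q hq
  by_cases hB : t = "B"
  · subst hB
    have hred : pvBOut partition "B"
        = ((PySem.Dict.counter (partition.filter (fun x => decide (0 < x)))).items).foldl
            (fun acc pc =>
              if PySem.Int.mod pc.1 2 = 0 ∧ PySem.Int.mod pc.2 2 = 1 then
                acc ++ List.replicate (pc.2 - 1).toNat pc.1 ++ (if 1 < pc.1 then [pc.1 - 1] else [])
              else acc ++ List.replicate pc.2.toNat pc.1) [] := rfl
    rw [hred, count_fold_parity _ 0 q hPpos, if_pos (by decide : ("B":String) = "B" ∨ ("B":String) = "D")]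
    by_cases hq : 0 < q
    · rw [if_pos hq, if_pos hq, hFP 0 hq]
    · rw [if_neg hq, if_neg hq]
  · by_cases hD : t = "D"
    · subst hD
      have hred : pvBOut partition "D"
          = ((PySem.Dict.counter (partition.filter (fun x => decide (0 < x)))).items).foldl
              (fun acc pc =>
                if PySem.Int.mod pc.1 2 = 0 ∧ PySem.Int.mod pc.2 2 = 1 then
                  acc ++ List.replicate (pc.2 - 1).toNat pc.1 ++ (if 1 < pc.1 then [pc.1 - 1] else [])
                else acc ++ List.replicate pc.2.toNat pc.1) [] := rfl
      rw [hred, count_fold_parity _ 0 q hPpos,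
          if_pos (by decide : ("D":String) = "B" ∨ ("D":String) = "D")]
      by_cases hq : 0 < q
      · rw [if_pos hq, if_pos hq, hFP 0 hq]
      · rw [if_neg hq, if_neg hq]
    · have hBD : ¬ (t = "B" ∨ t = "D") := by tauto
      by_cases hC : t = "C"
      · subst hC
        have hred : pvBOut partition "C"
            = ((PySem.Dict.counter (partition.filter (fun x => decide (0 < x)))).items).foldl
                (fun acc pc =>
                  if PySem.Int.mod pc.1 2 = 1 ∧ PySem.Int.mod pc.2 2 = 1 then
                    acc ++ List.replicate (pc.2 - 1).toNat pc.1 ++ (if 1 < pc.1 then [pc.1 - 1] else [])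
                  else acc ++ List.replicate pc.2.toNat pc.1) [] := rfl
        rw [hred, count_fold_parity _ 1 q hPpos,
            if_neg (by decide : ¬ (("C":String) = "B" ∨ ("C":String) = "D")),
            if_pos (rfl : ("C":String) = "C")]
        by_cases hq : 0 < q
        · rw [if_pos hq, if_pos hq, hFP 1 hq]
        · rw [if_neg hq, if_neg hq]
      · have hpar : (if t = "B" ∨ t = "D" then (some 0 : Option Int)
            else if t = "C" then some 1 else none) = none := by rw [if_neg hBD, if_neg hC]
        have hred : pvBOut partition t
            = ((PySem.Dict.counter (partition.filter (fun x => decide (0 < x)))).items).foldl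
                (fun acc pc => acc ++ List.replicate pc.2.toNat pc.1) [] := by
          simp only [pvBOut, hpar]
        rw [hred, count_fold_none _ q hPpos, if_neg hBD, if_neg hC]
        by_cases hq : 0 < q
        · rw [if_pos hq, if_pos hq, hPc q hq]
        · rw [if_neg hq, if_neg hq]

theorem x_collapse_main (partition : List Int) (t : String)
    (hnD : ¬ D_x_collapse_py partition t) :
    x_collapse_py partition t = x_collapse_py_alt partition t := by
  set L0 := PySem.List.sorted partition (fun x => x) true with hL0
  have hperm0 : L0.Perm partition := PySem.List.sorted_perm partition (fun x => x) true
  have hc0 : ∀ s : Int, L0.count s = partition.count s := fun s => hperm0.count_eq s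
  have hsum0 : L0.sum = partition.sum := hperm0.sum_eq
  set fuel := (2 * L0.sum + 10).toNat with hfuel
  set R := (pvALoop t fuel L0).filter (fun x => decide (0 < x)) with hR
  have key : ∀ s : Int, R.count s = (pvBOut partition t).count s := by
    intro s
    rw [hR, count_filter_pos, pvBOut_count]
    by_cases hs : 0 < s
    · rw [if_pos hs, if_pos hs]
      by_cases hBD : t = "B" ∨ t = "D"
      · rw [if_pos hBD]
        have hcard : (pvOddParts 0 L0).card ≤ fuel := by
          have hOP : pvOddParts 0 L0 = pvOddParts 0 partition :=
            pvOddParts_congr 0 L0 partition (fun u _ => hc0 u)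
          have hmem : t ∈ ["B", "C", "D"] := by
            rcases hBD with h | h <;> subst h <;> decide
          have hC' : ¬ (t = "C") := by
            rcases hBD with h | h <;> subst h <;> decide
          have hbound : ¬ (max (2 * partition.sum + 10) 0 <
              ((partition.dedup.countP (fun p => decide (0 < p ∧
                p % 2 = 0 ∧ partition.count p % 2 = 1))) : Int)) := by
            intro hlt
            refine hnD ⟨hmem, ?_⟩
            simpa only [if_neg hC'] using hlt
          have hce := card_pvOddParts 0 partition
          rw [hOP, hfuel, hsum0]
          omega
        rw [pvALoop_count t 0 (Or.inl ⟨hBD, rfl⟩) fuel L0 hcard s hs]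
        exact pvF_congr 0 L0 partition (fun u _ => hc0 u) s hs
      · rw [if_neg hBD]
        by_cases hC : t = "C"
        · rw [if_pos hC]
          have hcard : (pvOddParts 1 L0).card ≤ fuel := by
            have hOP : pvOddParts 1 L0 = pvOddParts 1 partition :=
              pvOddParts_congr 1 L0 partition (fun u _ => hc0 u)
            have hmem : t ∈ ["B", "C", "D"] := by subst hC; decide
            have hbound : ¬ (max (2 * partition.sum + 10) 0 <
                ((partition.dedup.countP (fun p => decide (0 < p ∧
                  p % 2 = 1 ∧ partition.count p % 2 = 1))) : Int)) := by
              intro hlt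
              refine hnD ⟨hmem, ?_⟩
              simpa only [if_pos hC] using hlt
            have hce := card_pvOddParts 1 partition
            rw [hOP, hfuel, hsum0]
            omega
          rw [pvALoop_count t 1 (Or.inr ⟨hC, rfl⟩) fuel L0 hcard s hs]
          exact pvF_congr 1 L0 partition (fun u _ => hc0 u) s hs
        · rw [if_neg hC, pvALoop_count_other t hBD hC fuel L0 s hs, hc0 s]
    · rw [if_neg hs, if_neg hs]
  have hpermRB : R.Perm (pvBOut partition t) := List.perm_iff_count.mpr key
  have hsorted : PySem.List.sorted R (fun x => x) true
      = PySem.List.sorted (pvBOut partition t) (fun x => x) true :=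
    sorted_rev_congr_perm _ _ hpermRB
  show (if PySem.List.sorted R (fun x => x) true = []
        then [0] else PySem.List.sorted R (fun x => x) true)
      = x_collapse_py_alt partition t
  rw [hsorted]
  rfl

theorem mem_pvDecLast (xs : List Int) (p x : Int) (hx : x ∈ pvDecLast xs p) :
    x ∈ xs ∨ x = p - 1 := by
  induction xs with
  | nil => simp [pvDecLast] at hx
  | cons y ys ih =>
    by_cases hmem : p ∈ ys
    · rw [pvDecLast, if_pos hmem] at hx
      rcases List.mem_cons.mp hx with h | h
      · exact Or.inl (List.mem_cons.mpr (Or.inl h))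
      · rcases ih h with h' | h'
        · exact Or.inl (List.mem_cons.mpr (Or.inr h'))
        · exact Or.inr h'
    · rw [pvDecLast, if_neg hmem] at hx
      by_cases hy : y = p
      · rw [if_pos hy] at hx
        rcases List.mem_cons.mp hx with h | h
        · exact Or.inr (by omega)
        · exact Or.inl (List.mem_cons.mpr (Or.inr h))
      · rw [if_neg hy] at hx
        exact Or.inl hx

theorem sum_pvDecLast (xs : List Int) (p : Int) (hp : p ∈ xs) :
    (pvDecLast xs p).sum = xs.sum - 1 := by
  induction xs with
  | nil => simp at hp
  | cons y ys ih =>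
    by_cases hmem : p ∈ ys
    · rw [pvDecLast, if_pos hmem, List.sum_cons, List.sum_cons, ih hmem]
      ring
    · have hy : y = p := by
        rcases List.mem_cons.mp hp with h | h
        · omega
        · exact absurd h hmem
      rw [pvDecLast, if_neg hmem, if_pos hy, List.sum_cons, List.sum_cons]
      ring

theorem sum_filter_pos_of_nonneg (L : List Int) (h : ∀ x ∈ L, 0 ≤ x) :
    (L.filter (fun x => decide (0 < x))).sum = L.sum := by
  induction L with
  | nil => rfl
  | cons y ys ih =>
    have hy := h y List.mem_cons_self
    have ih' := ih (fun x hx => h x (List.mem_cons_of_mem y hx))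
    by_cases h0 : 0 < y
    · rw [List.filter_cons_of_pos (by simpa using h0), List.sum_cons, List.sum_cons, ih']
    · have : y = 0 := by omega
      rw [List.filter_cons_of_neg (by simpa using h0), List.sum_cons, ih', this]
      ring

theorem pvALoop_sum (t : String) (r : Int)
    (ht : (t = "B" ∨ t = "D") ∧ r = 0 ∨ t = "C" ∧ r = 1) :
    ∀ (fuel : Nat) (L : List Int), fuel ≤ (pvOddParts r L).card →
      ((pvALoop t fuel L).filter (fun x => decide (0 < x))).sum
        = (L.filter (fun x => decide (0 < x))).sum - (fuel : Int) := by
  intro fuel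
  induction fuel with
  | zero =>
    intro L _
    show ((L.filter (fun x => decide (0 < x))).sum : Int) = _
    omega
  | succ fuel ih =>
    intro L hcard
    set L1 := L.filter (fun x => decide (0 < x)) with hL1def
    have hL1ne : ¬ L1 = [] := by
      intro hnil
      have : pvOddParts r L = ∅ := by
        rw [← pvOddParts_filter_pos r L, ← hL1def, hnil]
        simp [pvOddParts]
      rw [this] at hcard
      simp at hcard
    set L2 := PySem.List.sorted L1 (fun x => x) true with hL2def
    have hpermL2 : L2.Perm L1 := PySem.List.sorted_perm L1 (fun x => x) true
    have hc2 : ∀ s, L2.count s = L1.count s := fun s => hpermL2.count_eq s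
    have hc2L : ∀ s, 0 < s → L2.count s = L.count s := by
      intro s hs
      rw [hc2 s, hL1def, count_filter_pos, if_pos hs]
    have hO2 : pvOddParts r L2 = pvOddParts r L := by
      rw [pvOddParts_congr r L2 L hc2L]
    have hL2pos : ∀ x ∈ L2, (0:Int) < x := by
      intro x hx
      rw [hL2def, PySem.List.mem_sorted, hL1def] at hx
      simpa using (List.mem_filter.mp hx).2
    -- the step for a found violation p
    have hstep_sum : ∀ p : Int, p ∈ L2 → 0 < p →
        ((pvDecLast L2 p).filter (fun x => decide (0 < x))).sum = L1.sum - 1 := by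
      intro p hpL2 hp0
      have hnn : ∀ x ∈ pvDecLast L2 p, (0:Int) ≤ x := by
        intro x hx
        rcases mem_pvDecLast L2 p x hx with h | h
        · exact le_of_lt (hL2pos x h)
        · omega
      rw [sum_filter_pos_of_nonneg _ hnn, sum_pvDecLast L2 p hpL2, hpermL2.sum_eq]
    rcases ht with ⟨htBD, hr0⟩ | ⟨htC, hr1⟩
    · subst hr0
      rcases hfind : (PySem.List.sorted (PySem.Dict.counter L2).keys (fun p => p) true).find?
          (fun p => decide (0 < p) && decide (PySem.Int.mod p 2 = 0) &&
                    decide (PySem.Int.mod ((PySem.Dict.counter L2).getD p 0) 2 = 1)) with _ | p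
      · exfalso
        have hempty : pvOddParts 0 L2 = ∅ := by
          apply Finset.eq_empty_of_forall_notMem
          intro p hmem
          rw [pvOddParts, Finset.mem_filter, List.mem_toFinset] at hmem
          obtain ⟨hmL2, h0, hrp, hd⟩ := hmem
          have := List.find?_eq_none.mp hfind p ((mem_sorted_keys_counter L2 p).mpr hmL2)
          exact this ((pvPred_iff L2 0 p).mpr ⟨h0, hrp, hd⟩)
        rw [← hO2, hempty] at hcard
        simp at hcard
      · have hpred := List.find?_some hfind
        have hmemks := List.mem_of_find?_eq_some hfind
        rw [pvPred_iff] at hpred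
        obtain ⟨hp0, hpr, hpd⟩ := hpred
        have hpL2 : p ∈ L2 := (mem_sorted_keys_counter L2 p).mp hmemks
        have hstep : pvALoop t (fuel+1) L = pvALoop t fuel (pvDecLast L2 p) := by
          simp only [pvALoop]
          rw [if_neg hL1ne, if_pos htBD, ← hL1def, ← hL2def, hfind]
        have hOerase := pvOddParts_pvDecLast 0 L2 p hpL2 hp0 hpr hpd
        have hpmem : p ∈ pvOddParts 0 L2 := by
          rw [pvOddParts, Finset.mem_filter, List.mem_toFinset]
          exact ⟨hpL2, hp0, hpr, hpd⟩
        have hcard' : fuel ≤ (pvOddParts 0 (pvDecLast L2 p)).card := by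
          rw [hOerase, Finset.card_erase_of_mem hpmem, hO2]
          omega
        rw [hstep, ih (pvDecLast L2 p) hcard']
        have hd2 : ((pvDecLast L2 p).filter (fun x => decide (0 < x))).sum = L1.sum - 1 :=
          hstep_sum p hpL2 hp0
        rw [hd2]
        push_cast
        ring
    · subst hr1
      have hntBD : ¬ (t = "B" ∨ t = "D") := by subst htC; decide
      rcases hfind : (PySem.List.sorted (PySem.Dict.counter L2).keys (fun p => p) true).find?
          (fun p => decide (0 < p) && decide (PySem.Int.mod p 2 = 1) &&
                    decide (PySem.Int.mod ((PySem.Dict.counter L2).getD p 0) 2 = 1)) with _ | p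
      · exfalso
        have hempty : pvOddParts 1 L2 = ∅ := by
          apply Finset.eq_empty_of_forall_notMem
          intro p hmem
          rw [pvOddParts, Finset.mem_filter, List.mem_toFinset] at hmem
          obtain ⟨hmL2, h0, hrp, hd⟩ := hmem
          have := List.find?_eq_none.mp hfind p ((mem_sorted_keys_counter L2 p).mpr hmL2)
          exact this ((pvPred_iff L2 1 p).mpr ⟨h0, hrp, hd⟩)
        rw [← hO2, hempty] at hcard
        simp at hcard
      · have hpred := List.find?_some hfind
        have hmemks := List.mem_of_find?_eq_some hfind
        rw [pvPred_iff] at hpred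
        obtain ⟨hp0, hpr, hpd⟩ := hpred
        have hpL2 : p ∈ L2 := (mem_sorted_keys_counter L2 p).mp hmemks
        have hstep : pvALoop t (fuel+1) L = pvALoop t fuel (pvDecLast L2 p) := by
          simp only [pvALoop]
          rw [if_neg hL1ne, if_neg hntBD, if_pos htC, ← hL1def, ← hL2def, hfind]
        have hOerase := pvOddParts_pvDecLast 1 L2 p hpL2 hp0 hpr hpd
        have hpmem : p ∈ pvOddParts 1 L2 := by
          rw [pvOddParts, Finset.mem_filter, List.mem_toFinset]
          exact ⟨hpL2, hp0, hpr, hpd⟩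
        have hcard' : fuel ≤ (pvOddParts 1 (pvDecLast L2 p)).card := by
          rw [hOerase, Finset.card_erase_of_mem hpmem, hO2]
          omega
        rw [hstep, ih (pvDecLast L2 p) hcard']
        have hd2 : ((pvDecLast L2 p).filter (fun x => decide (0 < x))).sum = L1.sum - 1 :=
          hstep_sum p hpL2 hp0
        rw [hd2]
        push_cast
        ring

theorem x_collapse_tight_main (partition : List Int) (t : String)
    (hD : D_x_collapse_py partition t) :
    x_collapse_py partition t ≠ x_collapse_py_alt partition t := by
  obtain ⟨hmem, hlt⟩ := hD
  set r := (if t = "C" then (1:Int) else 0) with hrdef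
  have ht : (t = "B" ∨ t = "D") ∧ r = 0 ∨ t = "C" ∧ r = 1 := by
    simp only [List.mem_cons] at hmem
    rcases hmem with h | h | h
    · exact Or.inl ⟨Or.inl h, by rw [hrdef, if_neg (by subst h; decide)]⟩
    · exact Or.inr ⟨h, by rw [hrdef, if_pos h]⟩
    · rcases h with h | h
      · exact Or.inl ⟨Or.inr h, by rw [hrdef, if_neg (by subst h; decide)]⟩
      · simp at h
  set V := (pvOddParts r partition).card with hV
  have hltV : max (2 * partition.sum + 10) 0 < (V : Int) := by
    rw [hV, card_pvOddParts r partition]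
    exact hlt
  set L0 := PySem.List.sorted partition (fun x => x) true with hL0
  have hperm0 : L0.Perm partition := PySem.List.sorted_perm partition (fun x => x) true
  have hc0 : ∀ s : Int, 0 < s → L0.count s = partition.count s :=
    fun s _ => hperm0.count_eq s
  have hsum0 : L0.sum = partition.sum := hperm0.sum_eq
  have hOL0 : pvOddParts r L0 = pvOddParts r partition := pvOddParts_congr r L0 partition hc0
  set fuel := (2 * L0.sum + 10).toNat with hfuel
  have hfuelV : fuel < V := by
    rw [hfuel, hsum0]
    omega
  -- A's output sum: fuel fixes happen
  have hcardL0 : (pvOddParts r L0).card = V := by rw [hOL0, hV]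
  have hA : ((pvALoop t fuel L0).filter (fun x => decide (0 < x))).sum
      = (L0.filter (fun x => decide (0 < x))).sum - (fuel : Int) :=
    pvALoop_sum t r ht fuel L0 (by omega)
  -- B's output is (up to permutation) the run of A with enough fuel: V fixes happen
  have hkey : ∀ q : Int, (pvBOut partition t).count q
      = ((pvALoop t V L0).filter (fun x => decide (0 < x))).count q := by
    intro q
    rw [pvBOut_count, count_filter_pos]
    by_cases hq : 0 < q
    · rw [if_pos hq, if_pos hq, pvALoop_count t r ht V L0 (by omega) q hq]
      have hFc : pvF r L0 q = pvF r partition q := pvF_congr r L0 partition hc0 q hq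
      rcases ht with ⟨hBD, hr⟩ | ⟨hC, hr⟩
      · rw [if_pos hBD, hFc, hr]
      · rw [if_neg (show ¬ (t = "B" ∨ t = "D") by subst hC; decide), if_pos hC, hFc, hr]
    · rw [if_neg hq, if_neg hq]
  have hpermB : (pvBOut partition t).Perm ((pvALoop t V L0).filter (fun x => decide (0 < x))) :=
    List.perm_iff_count.mpr hkey
  have hB : (pvBOut partition t).sum
      = (L0.filter (fun x => decide (0 < x))).sum - (V : Int) := by
    rw [hpermB.sum_eq]
    exact pvALoop_sum t r ht V L0 (by omega)
  -- now compare the outputs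
  intro heq
  have hAdef : x_collapse_py partition t
      = (if PySem.List.sorted ((pvALoop t fuel L0).filter (fun x => decide (0 < x))) (fun x => x) true = []
         then [0]
         else PySem.List.sorted ((pvALoop t fuel L0).filter (fun x => decide (0 < x))) (fun x => x) true) := rfl
  have hBdef : x_collapse_py_alt partition t
      = (if PySem.List.sorted (pvBOut partition t) (fun x => x) true = []
         then [0]
         else PySem.List.sorted (pvBOut partition t) (fun x => x) true) := rfl
  set RA := (pvALoop t fuel L0).filter (fun x => decide (0 < x)) with hRA
  set SA := PySem.List.sorted RA (fun x => x) true with hSA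
  set OB := pvBOut partition t with hOB
  set SB := PySem.List.sorted OB (fun x => x) true with hSB
  have hsumSA : SA.sum = (L0.filter (fun x => decide (0 < x))).sum - (fuel : Int) := by
    rw [hSA, (PySem.List.sorted_perm RA (fun x => x) true).sum_eq, hRA]
    exact hA
  have hsumSB : SB.sum = (L0.filter (fun x => decide (0 < x))).sum - (V : Int) := by
    rw [hSB, (PySem.List.sorted_perm OB (fun x => x) true).sum_eq, hOB]
    exact hB
  rw [hAdef, hBdef] at heq
  by_cases hea : SA = []
  · by_cases heb : SB = []
    · rw [if_pos hea, if_pos heb] at heq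
      rw [hea] at hsumSA
      rw [heb] at hsumSB
      simp only [List.sum_nil] at hsumSA hsumSB
      omega
    · rw [if_pos hea, if_neg heb] at heq
      -- [0] = SB, so 0 ∈ OB, but OB has no zero entries
      have h0 : (0:Int) ∈ SB := by rw [← heq]; exact List.mem_cons_self
      rw [hSB, PySem.List.mem_sorted] at h0
      have hcz : OB.count 0 = 0 := by
        rw [hOB, hkey 0, count_filter_pos, if_neg (lt_irrefl 0)]
      have := List.count_pos_iff.mpr h0
      omega
  · by_cases heb : SB = []
    · rw [if_neg hea, if_pos heb] at heq
      have h0 : (0:Int) ∈ SA := by rw [heq]; exact List.mem_cons_self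
      rw [hSA, PySem.List.mem_sorted, hRA] at h0
      have := (List.mem_filter.mp h0).2
      simp at this
    · rw [if_neg hea, if_neg heb] at heq
      rw [heq] at hsumSA
      omega

-- ===== VERDICT (by name: the statement is the Claim_ definition above) =====
theorem x_collapse_py_spec : Claim_unchanged_x_collapse_py := by
  intro partition target_type _hDom hnD
  exact x_collapse_main partition target_type hnD

theorem x_collapse_py_changed : Claim_changed_x_collapse_py := by
  unfold Claim_changed_x_collapse_py; decide

theorem x_collapse_py_tight : Claim_exact_x_collapse_py := by
  intro partition target_type _hDom hD
  exact x_collapse_tight_main partition target_type hD
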